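-- pv_equiv track=rewrite | github.com/Davidwarchy/Psyche | Frequency Analysis/topology.py | intsPresent
-- ===== SOURCE A (Python) =====
-- def intsPresent(L):
--     for l0 in L:
--        for l1 in L:
--            l = list(set.intersection( set(l0), set(l1) ))
--            l.sort()
--            if l not in L:
--                return False
--     return True
-- ===== SOURCE B (Python) =====
-- def intsPresent(L):
--     # Triangular recursion over suffixes: intersection is commutative, so
--     # checking each head against its own suffix (self-pair included) covers
--     # every ordered pair A checks, with half the intersections computed.
--     present = {tuple(x) for x in L}
--
--     def ok(rest):
--         if not rest:
--             return True
--         sa = set(rest[0])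
--         return all(tuple(sorted(sa & set(b))) in present for b in rest) and ok(rest[1:])
--
--     return ok(L)
-- ===== Notes on version B (the rewrite author's own statement) =====
-- stated objective: alternative
-- what changed: The doubly-nested loop over all ordered pairs is replaced by a triangular recursion over suffixes that exploits commutativity of intersection (each head is intersected only with its own suffix, halving the intersections) together with a precomputed presence set.
import Mathlib
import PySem

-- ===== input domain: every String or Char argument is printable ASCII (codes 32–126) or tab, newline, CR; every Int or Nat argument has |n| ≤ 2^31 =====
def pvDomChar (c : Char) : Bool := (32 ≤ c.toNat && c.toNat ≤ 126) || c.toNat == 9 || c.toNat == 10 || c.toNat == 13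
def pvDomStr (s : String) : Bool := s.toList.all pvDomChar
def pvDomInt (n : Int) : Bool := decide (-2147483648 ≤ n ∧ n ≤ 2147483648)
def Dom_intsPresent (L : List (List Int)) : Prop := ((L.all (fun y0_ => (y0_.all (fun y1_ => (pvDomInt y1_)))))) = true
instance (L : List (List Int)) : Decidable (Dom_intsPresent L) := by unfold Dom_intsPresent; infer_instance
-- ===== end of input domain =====

-- B replaces A's nested loop over all ordered pairs by a triangular recursion over
-- suffixes, justified by commutativity of intersection (objective: alternative).

-- ===== PORT A =====
-- l = sorted(list(set(l0) & set(l1))): sorted distinct common elements (sorting makes the set iteration order irrelevant)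
def pvInterSorted (a b : List Int) : List Int :=
  PySem.List.sorted (PySem.Set.inter (PySem.Set.ofList a) (PySem.Set.ofList b)) (fun x => x) false

-- nested for-loops with early 'return False' = short-circuiting all/all
def intsPresent (L : List (List Int)) : Bool :=
  L.all (fun l0 => L.all (fun l1 => L.contains (pvInterSorted l0 l1)))

-- ===== PORT B =====
-- ok(rest): head intersected with every element of rest (self-pair included), then recurse on the tail
def intsPresentGo (present : PySem.Set (List Int)) : List (List Int) → Bool
  | [] => true
  | a :: tail =>
      ((a :: tail).all (fun b => PySem.Set.contains present (pvInterSorted a b)))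
        && intsPresentGo present tail

def intsPresent_alt (L : List (List Int)) : Bool :=
  let present : PySem.Set (List Int) := PySem.Set.ofList L
  intsPresentGo present L

-- ===== PRECONDITION & SPEC =====
def Spec_intsPresent (L : List (List Int)) (out : Bool) : Prop := out = intsPresent_alt L
instance (L : List (List Int)) (out : Bool) : Decidable (Spec_intsPresent L out) := by unfold Spec_intsPresent; infer_instance

-- ===== CLAIM (what is proved, stated in full; the proofs are below) =====
def Claim_equal_intsPresent : Prop := ∀ (L : List (List Int)), Dom_intsPresent L → Spec_intsPresent L (intsPresent L)

-- ===== LEMMAS AND PROOFS =====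
theorem pvInterSorted_comm (a b : List Int) : pvInterSorted a b = pvInterSorted b a := by
  unfold pvInterSorted
  refine (PySem.List.sorted_id_eq_sorted_id_iff_perm _ _).2 ?_
  refine (List.perm_ext_iff_of_nodup
    (PySem.Set.nodup_inter _ _ (PySem.Set.nodup_ofList _))
    (PySem.Set.nodup_inter _ _ (PySem.Set.nodup_ofList _))).2 ?_
  intro x
  simp only [PySem.Set.mem_inter]
  exact and_comm

theorem intsPresent_iff (L : List (List Int)) :
    intsPresent L = true ↔ ∀ l0 ∈ L, ∀ l1 ∈ L, pvInterSorted l0 l1 ∈ L := by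
  simp [intsPresent, List.all_eq_true]

theorem intsPresentGo_iff (L rest : List (List Int)) :
    intsPresentGo (PySem.Set.ofList L) rest = true ↔
      ∀ a ∈ rest, ∀ b ∈ rest, pvInterSorted a b ∈ L := by
  induction rest with
  | nil => simp [intsPresentGo]
  | cons a tail ih =>
    simp only [intsPresentGo, Bool.and_eq_true, List.all_eq_true,
      PySem.Set.contains_eq_listContains, List.contains_eq_mem, decide_eq_true_eq,
      PySem.Set.mem_ofList, ih]
    constructor
    · rintro ⟨h1, h2⟩ x hx y hy
      rcases List.mem_cons.1 hx with hxa | hxt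
      · subst hxa; exact h1 y hy
      · rcases List.mem_cons.1 hy with hya | hyt
        · subst hya; rw [pvInterSorted_comm]; exact h1 x hx
        · exact h2 x hxt y hyt
    · intro h
      exact ⟨fun b hb => h a (List.mem_cons.2 (Or.inl rfl)) b hb,
        fun x hx y hy => h x (List.mem_cons.2 (Or.inr hx)) y (List.mem_cons.2 (Or.inr hy))⟩

-- ===== VERDICT (by name: the statement is the Claim_ definition above) =====
theorem intsPresent_spec : Claim_equal_intsPresent := by
  intro L _
  unfold Spec_intsPresent intsPresent_alt
  exact Bool.eq_iff_iff.2 ((intsPresent_iff L).trans (intsPresentGo_iff L L).symm)
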